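-- pv_equiv track=rewrite | github.com/sirexeclp/energy-aware-computing | gpyjoules/generate_tables.py | highlight_baseline
-- ===== SOURCE A (Python) =====
-- def highlight_baseline(text: str, baseline: str):
--     highlight = r"\rowcolor{lightblue}"
--     search_str = f"\\SI{{{baseline}}}{{W}}"
--     result = []
--     for line in text.split("\n"):
--         if line.startswith(search_str):
--             line = highlight + line
--         result.append(line)
--     return "\n".join(result)
-- ===== SOURCE B (Python) =====
-- def highlight_baseline(text: str, baseline: str):
--     # Single left-to-right scan over the text: find each line's end by index,
--     # emit highlight + line pieces into one output buffer; no list of split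
--     # lines is materialised and no per-line string rebuild happens.
--     highlight = r"\rowcolor{lightblue}"
--     search_str = f"\\SI{{{baseline}}}{{W}}"
--     out = []
--     i, n = 0, len(text)
--     while True:
--         j = i
--         while j < n and text[j] != "\n":
--             j += 1
--         line = text[i:j]
--         if line.startswith(search_str):
--             out.append(highlight)
--         out.append(line)
--         if j == n:
--             return "".join(out)
--         out.append("\n")
--         i = j + 1
-- ===== Notes on version B (the rewrite author's own statement) =====
-- stated objective: alternative
-- what changed: Replaces split('\n') + per-line loop + '\n'.join with a single index scan over the text that finds each line boundary itself and emits highlight/line/newline pieces into one output buffer, never materialising the list of split lines.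
import Mathlib
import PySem

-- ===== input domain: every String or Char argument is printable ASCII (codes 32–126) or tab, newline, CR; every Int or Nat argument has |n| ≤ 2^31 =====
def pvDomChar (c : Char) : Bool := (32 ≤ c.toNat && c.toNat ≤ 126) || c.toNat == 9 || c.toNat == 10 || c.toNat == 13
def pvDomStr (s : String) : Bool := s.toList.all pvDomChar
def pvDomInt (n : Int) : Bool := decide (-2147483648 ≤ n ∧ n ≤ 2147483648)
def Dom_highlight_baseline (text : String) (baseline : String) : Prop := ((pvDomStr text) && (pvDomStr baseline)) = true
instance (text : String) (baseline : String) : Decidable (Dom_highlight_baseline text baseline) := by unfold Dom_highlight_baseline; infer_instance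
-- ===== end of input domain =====

-- B replaces A's split/map/join with one index scan over the text that emits pieces directly (alternative decomposition, same cost).

-- ===== PORT A =====
-- A: split on "\n", prepend the highlight to lines starting with search_str, join with "\n".
def highlight_baseline (text : String) (baseline : String) : String :=
  let highlight : List Char := "\\rowcolor{lightblue}".toList
  let search_str : List Char := "\\SI{".toList ++ baseline.toList ++ "}{W}".toList
  let result : List (List Char) :=
    (PySem.Chars.splitOn text.toList ['\n']).foldl
      (fun acc line =>
        acc ++ [if PySem.Chars.startswith line search_str then highlight ++ line else line]) []
  String.ofList (PySem.Chars.join ['\n'] result)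

-- ===== PORT B =====
-- inner `while j < n and text[j] != "\n"` + slice: returns (the line before the newline, rest after it if any)
def hbScanLine : List Char → List Char × Option (List Char)
  | [] => ([], none)
  | c :: cs =>
      if c = '\n' then ([], some cs)
      else
        let p := hbScanLine cs
        (c :: p.1, p.2)

theorem hbScanLine_rest_lt (cs : List Char) {l : List Char} {r : List Char}
    (h : hbScanLine cs = (l, some r)) : r.length < cs.length := by
  induction cs generalizing l r with
  | nil => simp [hbScanLine] at h
  | cons c cs ih =>
      by_cases hc : c = '\n'
      · rw [show hbScanLine (c :: cs) = ([], some cs) by simp [hbScanLine, hc]] at h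
        cases h
        simp
      · rw [show hbScanLine (c :: cs)
            = (c :: (hbScanLine cs).1, (hbScanLine cs).2) by simp [hbScanLine, hc]] at h
        rcases hp : hbScanLine cs with ⟨l2, r2⟩
        rw [hp] at h
        cases r2 with
        | none => have h2 := congrArg Prod.snd h; simp at h2
        | some r3 =>
            cases h
            exact Nat.lt_trans (ih hp) (Nat.lt_succ_self _)

-- outer while loop of Source B
def hbGo (search_str highlight : List Char) (cs : List Char) : List Char :=
  match h : hbScanLine cs with
  | (line, none) =>
      (if search_str.isPrefixOf line then highlight else []) ++ line
  | (line, some rest) =>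
      (if search_str.isPrefixOf line then highlight else []) ++ line
        ++ '\n' :: hbGo search_str highlight rest
termination_by cs.length
decreasing_by exact hbScanLine_rest_lt cs h

def highlight_baseline_alt (text : String) (baseline : String) : String :=
  let highlight : List Char := "\\rowcolor{lightblue}".toList
  let search_str : List Char := "\\SI{".toList ++ baseline.toList ++ "}{W}".toList
  String.ofList (hbGo search_str highlight text.toList)

-- ===== PRECONDITION & SPEC =====
def Spec_highlight_baseline (text : String) (baseline : String) (out : String) : Prop := out = highlight_baseline_alt text baseline
instance (text : String) (baseline : String) (out : String) : Decidable (Spec_highlight_baseline text baseline out) := by unfold Spec_highlight_baseline; infer_instance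

-- ===== CLAIM (what is proved, stated in full; the proofs are below) =====
def Claim_equal_highlight_baseline : Prop := ∀ (text : String) (baseline : String), Dom_highlight_baseline text baseline → Spec_highlight_baseline text baseline (highlight_baseline text baseline)

-- ===== LEMMAS AND PROOFS =====

-- small-step equations for hbScanLine
theorem hbScanLine_nl (cs : List Char) : hbScanLine ('\n' :: cs) = ([], some cs) := by
  simp [hbScanLine]

theorem hbScanLine_cons {c : Char} (hc : c ≠ '\n') (cs : List Char) :
    hbScanLine (c :: cs) = (c :: (hbScanLine cs).1, (hbScanLine cs).2) := by
  simp [hbScanLine, hc]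

-- the per-line split, written as the structural recursion used by B's scan
def hbSplitNL (cs : List Char) : List (List Char) :=
  match h : hbScanLine cs with
  | (line, none) => [line]
  | (line, some rest) => line :: hbSplitNL rest
termination_by cs.length
decreasing_by exact hbScanLine_rest_lt cs h

-- prepend p to the first block
def hbConsFirst (p : List Char) : List (List Char) → List (List Char)
  | [] => [p]
  | x :: xs => (p ++ x) :: xs

theorem hbSplitNL_none {cs l : List Char} (h : hbScanLine cs = (l, none)) :
    hbSplitNL cs = [l] := by
  rw [hbSplitNL]
  split
  · next l' h' => rw [h] at h'; cases h'; rfl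
  · next l' r' h' => rw [h] at h'; cases h'

theorem hbSplitNL_some {cs l r : List Char} (h : hbScanLine cs = (l, some r)) :
    hbSplitNL cs = l :: hbSplitNL r := by
  rw [hbSplitNL]
  split
  · next l' h' => rw [h] at h'; cases h'
  · next l' r' h' => rw [h] at h'; cases h'; rfl

theorem hbGo_none {s hl : List Char} {cs l : List Char} (h : hbScanLine cs = (l, none)) :
    hbGo s hl cs = (if s.isPrefixOf l then hl else []) ++ l := by
  rw [hbGo]
  split
  · next l' h' => rw [h] at h'; cases h'; rfl
  · next l' r' h' => rw [h] at h'; cases h'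

theorem hbGo_some {s hl : List Char} {cs l r : List Char} (h : hbScanLine cs = (l, some r)) :
    hbGo s hl cs = (if s.isPrefixOf l then hl else []) ++ l ++ '\n' :: hbGo s hl r := by
  rw [hbGo]
  split
  · next l' h' => rw [h] at h'; cases h'
  · next l' r' h' => rw [h] at h'; cases h'; rfl

theorem hbSplitNL_ne_nil (cs : List Char) : hbSplitNL cs ≠ [] := by
  rcases h : hbScanLine cs with ⟨l, r⟩
  cases r with
  | none => rw [hbSplitNL_none h]; simp
  | some r' => rw [hbSplitNL_some h]; simp

theorem hbConsFirst_consFirst (p q : List Char) (l : List (List Char)) :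
    hbConsFirst p (hbConsFirst q l) = hbConsFirst (p ++ q) l := by
  cases l <;> simp [hbConsFirst]

theorem hbSplitNL_cons_ne {c : Char} (hc : c ≠ '\n') (rest : List Char) :
    hbSplitNL (c :: rest) = hbConsFirst [c] (hbSplitNL rest) := by
  rcases h2 : hbScanLine rest with ⟨l2, r2⟩
  have hstep : hbScanLine (c :: rest) = (c :: l2, r2) := by
    rw [hbScanLine_cons hc, h2]
  cases r2 with
  | none => rw [hbSplitNL_none hstep, hbSplitNL_none h2]; rfl
  | some r3 => rw [hbSplitNL_some hstep, hbSplitNL_some h2]; rfl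

theorem hb_go_eq (fuel : Nat) (l cur : List Char) (acc : List (List Char))
    (hf : l.length < fuel) :
    PySem.Chars.splitOn.go ['\n'] fuel l cur acc
      = acc.reverse ++ hbConsFirst cur.reverse (hbSplitNL l) := by
  induction fuel generalizing l cur acc with
  | zero => omega
  | succ fuel ih =>
      cases l with
      | nil =>
          rw [PySem.Chars.splitOn.go]
          rw [hbSplitNL_none (show hbScanLine [] = ([], none) from rfl)]
          simp [hbConsFirst]
          omega
      | cons c rest =>
          rw [PySem.Chars.splitOn.go]
          by_cases hc : c = '\n'
          · have hpre : List.isPrefixOf ['\n'] (c :: rest) = true := by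
              simp [List.isPrefixOf, hc]
            rw [if_pos hpre]
            have hdrop : List.drop ['\n'].length (c :: rest) = rest := by simp
            rw [hdrop, ih rest [] (cur.reverse :: acc) (by simp at hf ⊢; omega)]
            subst hc
            rw [hbSplitNL_some (hbScanLine_nl rest)]
            rcases hs : hbSplitNL rest with _ | ⟨x, xs⟩
            · exact absurd hs (hbSplitNL_ne_nil rest)
            · simp [hbConsFirst]
          · have hpre : List.isPrefixOf ['\n'] (c :: rest) = false := by
              simp [List.isPrefixOf]
              exact fun h => absurd h.symm hc
            rw [if_neg (by simp [hpre])]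
            rw [ih rest (c :: cur) acc (by simp at hf ⊢; omega)]
            rw [hbSplitNL_cons_ne hc rest, hbConsFirst_consFirst]
            simp

theorem splitOn_nl (s : List Char) :
    PySem.Chars.splitOn s ['\n'] = hbSplitNL s := by
  unfold PySem.Chars.splitOn
  rw [hb_go_eq (s.length + 1) s [] [] (Nat.lt_succ_self _)]
  rcases h : hbSplitNL s with _ | ⟨x, xs⟩
  · exact absurd h (hbSplitNL_ne_nil s)
  · simp [hbConsFirst]

theorem hb_foldl_map {α β : Type} (f : α → β) (l : List α) (acc : List β) :
    l.foldl (fun acc line => acc ++ [f line]) acc = acc ++ l.map f := by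
  induction l generalizing acc with
  | nil => simp
  | cons x xs ih => simp [List.foldl, ih]

theorem hb_intercalate_cons₂ (sep a b : List Char) (l : List (List Char)) :
    List.intercalate sep (a :: b :: l) = a ++ sep ++ List.intercalate sep (b :: l) := by
  simp [List.intercalate]

theorem hb_join_map_eq_go (search_str highlight : List Char) (s : List Char) :
    PySem.Chars.join ['\n']
      ((hbSplitNL s).map
        (fun line => if PySem.Chars.startswith line search_str then highlight ++ line else line))
      = hbGo search_str highlight s := by
  induction s using hbSplitNL.induct with
  | case1 cs line h =>
      rw [hbSplitNL_none h, hbGo_none h]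
      simp [PySem.Chars.join, PySem.Chars.startswith, List.intercalate]
      split <;> simp
  | case2 cs line rest h ih =>
      rw [hbSplitNL_some h, hbGo_some h, ← ih]
      rcases hs : hbSplitNL rest with _ | ⟨x, xs⟩
      · exact absurd hs (hbSplitNL_ne_nil rest)
      · simp only [PySem.Chars.join, PySem.Chars.startswith, List.map_cons,
          hb_intercalate_cons₂]
        split <;> simp

-- ===== VERDICT (by name: the statement is the Claim_ definition above) =====
theorem highlight_baseline_spec : Claim_equal_highlight_baseline := by
  intro text baseline _
  unfold Spec_highlight_baseline highlight_baseline highlight_baseline_alt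
  simp only [splitOn_nl, hb_foldl_map, List.nil_append]
  rw [hb_join_map_eq_go]
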